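-- pv_equiv track=rewrite | github.com/Mussylman/speed_limit | src/plate_recognizer.py | _kz_score_7
-- ===== SOURCE A (Python) =====
-- def _kz_score_7(text: str) -> int:
--     """Оценка соответствия 7-символьного KZ формату (XXX YY XX)."""
--     if len(text) != 7:
--         return 0
--     score = 0
--     for i in range(3):
--         if text[i].isdigit():
--             score += 1
--     for i in range(3, 5):
--         if text[i].isalpha():
--             score += 1
--     for i in range(5, 7):
--         if text[i].isdigit():
--             score += 1
--     return score
-- ===== SOURCE B (Python) =====
-- def _kz_score_7(text: str) -> int:
--     # Count digits globally, then correct the middle window (positions 3..4):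
--     # there letters score instead of digits, so swap its digit count for its alpha count.
--     if len(text) != 7:
--         return 0
--     mid = text[3:5]
--     return (sum(c.isdigit() for c in text)
--             - sum(c.isdigit() for c in mid)
--             + sum(c.isalpha() for c in mid))
-- ===== Notes on version B (the rewrite author's own statement) =====
-- stated objective: alternative
-- what changed: Replaces the three fixed-range index loops with a count-and-correct scheme: one global digit count over the whole string, then the middle slice text[3:5] swaps its digit count for its alpha count.
import Mathlib
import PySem

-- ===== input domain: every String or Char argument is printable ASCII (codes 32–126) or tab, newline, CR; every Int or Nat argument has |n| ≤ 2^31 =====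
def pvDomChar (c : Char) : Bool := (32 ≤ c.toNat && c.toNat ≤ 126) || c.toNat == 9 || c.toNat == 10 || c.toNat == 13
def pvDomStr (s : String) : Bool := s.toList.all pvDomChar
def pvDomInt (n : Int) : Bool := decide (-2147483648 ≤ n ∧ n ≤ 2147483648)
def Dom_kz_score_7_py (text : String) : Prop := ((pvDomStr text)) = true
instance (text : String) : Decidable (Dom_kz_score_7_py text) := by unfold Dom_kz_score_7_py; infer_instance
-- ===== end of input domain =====

-- B replaces the three fixed-range index loops by a global digit count corrected on the
-- middle slice text[3:5] (alternative decomposition; return value equivalence proved below).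


-- ===== PORT A =====
def kz_score_7_py (text : String) : Int :=
  if PySem.Str.len text ≠ 7 then 0
  else
    let cs := text.toList
    let step := fun (pred : Char → Bool) (score : Int) (i : Int) =>
      match PySem.List.pyGet? cs i with
      | some c => if pred c then score + 1 else score
      | none => score
    let score : Int := 0
    let score := (PySem.List.pyRange 0 3 1).foldl (step PySem.Chars.isdigit) score
    let score := (PySem.List.pyRange 3 5 1).foldl (step PySem.Chars.isalpha) score
    let score := (PySem.List.pyRange 5 7 1).foldl (step PySem.Chars.isdigit) score
    score

-- ===== PORT B =====
def kz_score_7_py_alt (text : String) : Int :=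
  if PySem.Str.len text ≠ 7 then 0
  else
    let mid := PySem.List.slice text.toList (some 3) (some 5)
    ((text.toList.countP PySem.Chars.isdigit : Int)
      - (mid.countP PySem.Chars.isdigit : Int)
      + (mid.countP PySem.Chars.isalpha : Int))

-- ===== PRECONDITION & SPEC =====
def Spec_kz_score_7_py (text : String) (out : Int) : Prop := out = kz_score_7_py_alt text
instance (text : String) (out : Int) : Decidable (Spec_kz_score_7_py text out) := by unfold Spec_kz_score_7_py; infer_instance

-- ===== CLAIM (what is proved, stated in full; the proofs are below) =====
def Claim_equal_kz_score_7_py : Prop := ∀ (text : String), Dom_kz_score_7_py text → Spec_kz_score_7_py text (kz_score_7_py text)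

-- ===== LEMMAS AND PROOFS =====

-- ===== VERDICT (by name: the statement is the Claim_ definition above) =====
theorem kz_score_7_py_spec : Claim_equal_kz_score_7_py := by
  intro text _
  unfold Spec_kz_score_7_py kz_score_7_py kz_score_7_py_alt
  by_cases h : PySem.Str.len text = 7
  · simp only [h]
    have hlen : text.toList.length = 7 := by
      have := PySem.Str.len_eq text
      omega
    obtain ⟨a,b,c,d,e,f,g,hcs⟩ : ∃ a b c d e f g, text.toList = [a,b,c,d,e,f,g] := by
      match hl : text.toList, hlen with
      | [a,b,c,d,e,f,g], _ => exact ⟨a,b,c,d,e,f,g,rfl⟩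
    simp [hcs, PySem.List.pyRange, PySem.List.pyGet?, PySem.List.pyIdx?, PySem.List.slice,
          List.countP, List.countP.go, List.range_succ]
    cases PySem.Chars.isdigit a <;> cases PySem.Chars.isdigit b <;> cases PySem.Chars.isdigit c <;>
      cases PySem.Chars.isdigit d <;> cases PySem.Chars.isalpha d <;>
      cases PySem.Chars.isdigit e <;> cases PySem.Chars.isalpha e <;>
      cases PySem.Chars.isdigit f <;> cases PySem.Chars.isdigit g <;> simp
  · have h' : (text.length : Int) ≠ 7 := by
      simp only [PySem.Str.len] at h
      simpa using h
    simp [h']
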